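-- pv_equiv track=rewrite | github.com/Uzair-Waseem-390/FlowGuard | services/test_executor.py | _detects_stack_trace
-- ===== SOURCE A (Python) =====
-- def _detects_stack_trace(response_body: str) -> bool:
--     """Check for stack traces or sensitive info"""
--     stack_trace_indicators = [
--         "Traceback", "at line", "File \"", "Exception:",
--         "java.lang.", "System.Exception", "stack trace",
--         "error occurred", "internal server error"
--     ]
--
--     response_lower = response_body.lower()
--     return any(indicator.lower() in response_lower for indicator in stack_trace_indicators)
-- ===== SOURCE B (Python) =====
-- # Single left-to-right scan over the body: at each position try each (pre-lowercased)
-- # indicator by charwise case-folded comparison; no full lower() copy of the body is built.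
-- _INDICATORS = [
--     "traceback", "at line", 'file "', "exception:",
--     "java.lang.", "system.exception", "stack trace",
--     "error occurred", "internal server error",
-- ]
--
--
-- def _match_at(body, i, ind):
--     tail = body[i:i + len(ind)]
--     if len(tail) < len(ind):
--         return False
--     return all(a.lower() == b for a, b in zip(tail, ind))
--
--
-- def _detects_stack_trace(response_body: str) -> bool:
--     for i in range(len(response_body)):
--         for ind in _INDICATORS:
--             if _match_at(response_body, i, ind):
--                 return True
--     return False
-- ===== Notes on version B (the rewrite author's own statement) =====
-- stated objective: alternative
-- what changed: A lowercases the whole body and runs nine independent substring scans; B makes one left-to-right scan over positions of the original body, at each position matching the pre-lowercased indicators by charwise case-folded comparison, with early exit on the first hit and no lowered copy of the body.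
import Mathlib
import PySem

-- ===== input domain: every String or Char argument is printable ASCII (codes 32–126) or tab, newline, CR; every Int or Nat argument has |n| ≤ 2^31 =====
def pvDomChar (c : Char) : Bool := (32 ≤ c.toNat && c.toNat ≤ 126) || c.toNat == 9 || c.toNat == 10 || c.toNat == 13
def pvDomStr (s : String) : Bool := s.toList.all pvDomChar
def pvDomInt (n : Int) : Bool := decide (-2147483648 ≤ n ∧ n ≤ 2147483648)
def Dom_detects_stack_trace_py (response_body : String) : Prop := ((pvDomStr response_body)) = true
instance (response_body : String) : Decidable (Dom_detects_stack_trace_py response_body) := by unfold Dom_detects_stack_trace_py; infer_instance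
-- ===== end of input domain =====

-- B replaces A's nine independent substring scans of a lowered copy of the body by one
-- left-to-right scan over positions matching pre-lowercased indicators charwise (objective: alternative).

-- ===== PORT A =====
def pvStackTraceIndicators : List String :=
  ["Traceback", "at line", "File \"", "Exception:",
   "java.lang.", "System.Exception", "stack trace",
   "error occurred", "internal server error"]

def detects_stack_trace_py (response_body : String) : Bool :=
  let response_lower := PySem.Str.lower response_body
  pvStackTraceIndicators.any (fun indicator =>
    PySem.Str.isIn (PySem.Str.lower indicator) response_lower)

-- ===== PORT B =====
def pvAltIndicators : List (List Char) :=
  ["traceback".toList, "at line".toList, "file \"".toList, "exception:".toList,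
   "java.lang.".toList, "system.exception".toList, "stack trace".toList,
   "error occurred".toList, "internal server error".toList]

-- _match_at: tail = body[i:i+len(ind)]; length check; all(a.lower() == b for a, b in zip(tail, ind))
def pvMatchAt (body : List Char) (i : Nat) (ind : List Char) : Bool :=
  let tail := (body.drop i).take ind.length
  if tail.length < ind.length then false
  else (tail.zip ind).all (fun p => PySem.Chars.lowerChar p.1 == p.2)

def detects_stack_trace_py_alt (response_body : String) : Bool :=
  (List.range response_body.toList.length).any (fun i =>
    pvAltIndicators.any (fun ind => pvMatchAt response_body.toList i ind))

-- ===== PRECONDITION & SPEC =====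
def Spec_detects_stack_trace_py (response_body : String) (out : Bool) : Prop := out = detects_stack_trace_py_alt response_body
instance (response_body : String) (out : Bool) : Decidable (Spec_detects_stack_trace_py response_body out) := by unfold Spec_detects_stack_trace_py; infer_instance

-- ===== CLAIM (what is proved, stated in full; the proofs are below) =====
def Claim_equal_detects_stack_trace_py : Prop := ∀ (response_body : String), Dom_detects_stack_trace_py response_body → Spec_detects_stack_trace_py response_body (detects_stack_trace_py response_body)

-- ===== LEMMAS AND PROOFS =====

-- pvMatchAt on a tail is exactly a prefix of the case-folded tail
lemma pvMatch_prefix (ind t : List Char) :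
    (if ((t.take ind.length).length < ind.length) then false
     else ((t.take ind.length).zip ind).all (fun p => PySem.Chars.lowerChar p.1 == p.2)) = true
      ↔ ind <+: t.map PySem.Chars.lowerChar := by
  induction ind generalizing t with
  | nil => simp
  | cons c cs ih =>
    cases t with
    | nil => simp
    | cons b bs =>
      by_cases hlen : bs.length < cs.length
      · have h1 : ((b :: bs).take (c :: cs).length).length < (c :: cs).length := by
          simp [List.length_take]; omega
        simp only [if_pos h1]
        constructor
        · intro h; exact absurd h (by simp)
        · intro h
          have := h.length_le
          simp at this; omega
      · have h1 : ¬ ((b :: bs).take (c :: cs).length).length < (c :: cs).length := by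
          simp [List.length_take]; omega
        have h2 : ¬ ((bs.take cs.length).length < cs.length) := by
          simp [List.length_take]; omega
        simp only [List.length_cons, List.take_succ_cons, List.zip_cons_cons,
          List.all_cons, List.map_cons, List.cons_prefix_cons]
        rw [if_neg (by simpa using h1), Bool.and_eq_true, ← ih bs, if_neg h2, beq_iff_eq]
        constructor
        · rintro ⟨hc, hp⟩; exact ⟨hc.symm, hp⟩
        · rintro ⟨hc, hp⟩; exact ⟨hc.symm, hp⟩

lemma pvMatchAt_iff (body ind : List Char) (i : Nat) :
    pvMatchAt body i ind = true ↔ ind <+: (body.drop i).map PySem.Chars.lowerChar := by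
  unfold pvMatchAt
  exact pvMatch_prefix ind (body.drop i)

-- one indicator: A's lowered-substring test equals B's positional scan for its lowered form
lemma pvIndicator_iff (s a : String) (hb : PySem.Chars.lower a.toList ≠ []) :
    PySem.Str.isIn (PySem.Str.lower a) (PySem.Str.lower s) = true
      ↔ ∃ i < s.toList.length, pvMatchAt s.toList i (PySem.Chars.lower a.toList) = true := by
  rw [PySem.Str.isIn_iff_infix]
  simp only [PySem.Str.toList_lower]
  rw [← PySem.Chars.isIn_iff_infix, ← PySem.Chars.exists_prefix_drop_iff_isIn]
  constructor
  · rintro ⟨j, hj⟩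
    refine ⟨j, ?_, ?_⟩
    · by_contra hlt
      push Not at hlt
      have hnil : (PySem.Chars.lower s.toList).drop j = [] := by
        apply List.drop_eq_nil_of_le
        simpa [PySem.Chars.lower] using hlt
      rw [hnil] at hj
      exact hb (List.prefix_nil.mp hj)
    · rw [pvMatchAt_iff]
      simpa [PySem.Chars.lower, List.map_drop] using hj
  · rintro ⟨i, _, hm⟩
    rw [pvMatchAt_iff] at hm
    exact ⟨i, by simpa [PySem.Chars.lower, List.map_drop] using hm⟩

lemma pvAltIndicators_eq :
    pvAltIndicators = pvStackTraceIndicators.map (fun a => PySem.Chars.lower a.toList) := by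
  decide

lemma pvAll_nonempty : ∀ a ∈ pvStackTraceIndicators, PySem.Chars.lower a.toList ≠ [] := by
  decide

-- ===== VERDICT (by name: the statement is the Claim_ definition above) =====
theorem detects_stack_trace_py_spec : Claim_equal_detects_stack_trace_py := by
  intro s _
  unfold Spec_detects_stack_trace_py
  rw [Bool.eq_iff_iff]
  unfold detects_stack_trace_py detects_stack_trace_py_alt
  rw [pvAltIndicators_eq]
  simp only [List.any_eq_true, List.any_map, List.mem_range, Function.comp]
  constructor
  · rintro ⟨a, ha, hin⟩
    obtain ⟨i, hi, hm⟩ := (pvIndicator_iff s a (pvAll_nonempty a ha)).mp hin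
    exact ⟨i, hi, a, ha, hm⟩
  · rintro ⟨i, hi, a, ha, hm⟩
    exact ⟨a, ha, (pvIndicator_iff s a (pvAll_nonempty a ha)).mpr ⟨i, hi, hm⟩⟩
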